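-- pv_equiv track=rewrite | github.com/remigenet/ASThetic | main/node_selection.py | implied_previous_needs
-- ===== SOURCE A (Python) =====
-- from typing import Tuple, Set, List, Union, Callable, Optional
--
-- def implied_previous_needs(node_adds: List[Set[str]], node_costs: List[Set[str]], selected: List[bool]) \
--         -> Tuple[List[Set[str]], List[Set[str]], List[Set[str]]]:
--     assets = [set().union(*(s for s, b in zip(node_adds[:end], selected[:end]) if b)) if any(selected[:end]) else set()
--               for end in range(len(node_adds) + 1)]
--     needs = [set().union(*(s for s, b in zip(node_costs[:end], selected[:end]) if b)) if any(selected[:end]) else set()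
--              for end in range(len(node_adds) + 1)]
--     if needs[0]:
--         raise ImportError(f'You should not have first need different from 0 {needs[0]}')
--     missing: List[Set[str]] = [needs[0]] + [n - a for n, a in zip(needs[1:], assets[:-1])]
--     return assets, needs, missing
-- ===== SOURCE B (Python) =====
-- from typing import Tuple, Set, List
--
--
-- def implied_previous_needs(node_adds: List[Set[str]], node_costs: List[Set[str]], selected: List[bool]) \
--         -> Tuple[List[Set[str]], List[Set[str]], List[Set[str]]]:
--     # One pass: each prefix union is the previous one extended by at most one set.
--     assets: List[Set[str]] = [set()]
--     needs: List[Set[str]] = [set()]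
--     missing: List[Set[str]] = [set()]
--     running_assets: Set[str] = set()
--     running_needs: Set[str] = set()
--     for i in range(len(node_adds)):
--         prev_assets = running_assets
--         if i < len(selected) and selected[i]:
--             running_assets = running_assets | node_adds[i]
--             if i < len(node_costs):
--                 running_needs = running_needs | node_costs[i]
--         assets.append(running_assets)
--         needs.append(running_needs)
--         missing.append(running_needs - prev_assets)
--     return assets, needs, missing
-- ===== Notes on version B (the rewrite author's own statement) =====
-- stated objective: alternative
-- what changed: Instead of recomputing each prefix's union of selected add/cost sets from scratch (and re-slicing the lists per prefix), B keeps a running union per kind and extends it by at most one set per step, emitting assets/needs/missing in a single pass.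
import Mathlib
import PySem

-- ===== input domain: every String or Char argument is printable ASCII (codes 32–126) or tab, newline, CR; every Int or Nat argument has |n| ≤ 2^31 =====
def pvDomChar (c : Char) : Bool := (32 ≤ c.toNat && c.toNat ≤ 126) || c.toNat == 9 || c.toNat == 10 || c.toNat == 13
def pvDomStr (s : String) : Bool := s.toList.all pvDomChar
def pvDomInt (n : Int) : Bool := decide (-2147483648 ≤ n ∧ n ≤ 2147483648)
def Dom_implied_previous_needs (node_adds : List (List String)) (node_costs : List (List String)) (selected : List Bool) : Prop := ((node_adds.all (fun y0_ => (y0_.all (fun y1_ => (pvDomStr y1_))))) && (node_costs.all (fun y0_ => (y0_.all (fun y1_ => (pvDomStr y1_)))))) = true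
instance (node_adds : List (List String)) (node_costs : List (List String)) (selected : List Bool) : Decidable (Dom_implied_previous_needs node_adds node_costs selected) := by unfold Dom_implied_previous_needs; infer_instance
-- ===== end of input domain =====

-- B builds the prefix unions in one pass with a running union instead of A's per-prefix re-union;
-- proved equal on all inputs (A's raise branch is unreachable: needs[0] is always the empty set).


-- ===== PORT A =====
-- set().union(*(s for s, b in zip(xs[:end], sel[:end]) if b))
def pvUnionSel (xs : List (List String)) (sel : List Bool) : PySem.Set String :=
  (((xs.zip sel).filter (fun p => p.2)).map (fun p => p.1)).foldl
    (fun acc s => PySem.Set.union acc s) PySem.Set.empty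

-- Literal port of A.  xs[:end] is List.take (end ≤ len, exact); needs[0] is needs.headD ∅
-- (needs is nonempty, exact); the 'if needs[0]: raise' branch is omitted: needs[0] is the
-- empty set on every input (end = 0 prefix), so A never raises and is total.
def implied_previous_needs (node_adds : List (List String)) (node_costs : List (List String)) (selected : List Bool) : List (List String) × List (List String) × List (List String) :=
  let assets := (List.range (node_adds.length + 1)).map (fun e =>
    if (selected.take e).any (fun b => b) then pvUnionSel (node_adds.take e) (selected.take e)
    else PySem.Set.empty)
  let needs := (List.range (node_adds.length + 1)).map (fun e =>
    if (selected.take e).any (fun b => b) then pvUnionSel (node_costs.take e) (selected.take e)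
    else PySem.Set.empty)
  let missing := (needs.headD PySem.Set.empty) ::
    (((needs.drop 1).zip assets.dropLast).map (fun p => PySem.Set.diff p.1 p.2))
  (assets, needs, missing)

-- ===== PORT B =====
-- One step of B's loop body; state = (assets, needs, missing, running_assets, running_needs).
-- node_adds[i] with i ∈ range(len(node_adds)) is always in range, so getD is exact here.
def pvStepB (node_adds : List (List String)) (node_costs : List (List String)) (selected : List Bool)
    (st : List (List String) × List (List String) × List (List String) × List String × List String)
    (i : Nat) : List (List String) × List (List String) × List (List String) × List String × List String :=
  let (assets, needs, missing, ra, rn) := st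
  let prev := ra
  if (decide (i < selected.length) && selected.getD i false) then
    let ra' := PySem.Set.union ra (node_adds.getD i [])
    let rn' := if i < node_costs.length then PySem.Set.union rn (node_costs.getD i []) else rn
    (assets ++ [ra'], needs ++ [rn'], missing ++ [PySem.Set.diff rn' prev], ra', rn')
  else
    (assets ++ [ra], needs ++ [rn], missing ++ [PySem.Set.diff rn prev], ra, rn)

def implied_previous_needs_alt (node_adds : List (List String)) (node_costs : List (List String)) (selected : List Bool) : List (List String) × List (List String) × List (List String) :=
  let st := (List.range node_adds.length).foldl (pvStepB node_adds node_costs selected)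
    ([PySem.Set.empty], [PySem.Set.empty], [PySem.Set.empty],
     PySem.Set.empty, PySem.Set.empty)
  (st.1, st.2.1, st.2.2.1)

-- ===== PRECONDITION & SPEC =====
def Spec_implied_previous_needs (node_adds : List (List String)) (node_costs : List (List String)) (selected : List Bool) (out : List (List String) × List (List String) × List (List String)) : Prop := out = implied_previous_needs_alt node_adds node_costs selected
instance (node_adds : List (List String)) (node_costs : List (List String)) (selected : List Bool) (out : List (List String) × List (List String) × List (List String)) : Decidable (Spec_implied_previous_needs node_adds node_costs selected out) := by unfold Spec_implied_previous_needs; infer_instance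

-- ===== CLAIM (what is proved, stated in full; the proofs are below) =====
def Claim_equal_implied_previous_needs : Prop := ∀ (node_adds : List (List String)) (node_costs : List (List String)) (selected : List Bool), Dom_implied_previous_needs node_adds node_costs selected → Spec_implied_previous_needs node_adds node_costs selected (implied_previous_needs node_adds node_costs selected)

-- ===== LEMMAS AND PROOFS =====

set_option maxRecDepth 8192

-- zip ignores the tail of its second argument beyond the first's length
theorem pv_zip_take_right {α β : Type} (xs : List α) (ys : List β) (k : Nat)
    (h : xs.length ≤ k) : xs.zip (ys.take k) = xs.zip ys := by
  induction xs generalizing ys k with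
  | nil => simp
  | cons x xs ih =>
    cases ys with
    | nil => simp
    | cons y ys =>
      cases k with
      | zero => simp at h
      | succ k => simpa using ih ys k (by simpa using h)

-- zip ignores the tail of its first argument beyond the second's length
theorem pv_zip_take_left {α β : Type} (xs : List α) (ys : List β) (k : Nat)
    (h : ys.length ≤ k) : (xs.take k).zip ys = xs.zip ys := by
  induction xs generalizing ys k with
  | nil => simp
  | cons x xs ih =>
    cases ys with
    | nil => simp
    | cons y ys =>
      cases k with
      | zero => simp at h
      | succ k => simpa using ih ys k (by simpa using h)

-- if no selected flag is true in the prefix, the union is empty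
theorem pvUnionSel_of_any_false (xs : List (List String)) (sel : List Bool)
    (h : ¬ sel.any (fun b => b) = true) : pvUnionSel xs sel = PySem.Set.empty := by
  have hfil : (xs.zip sel).filter (fun p => p.2) = [] := by
    apply List.filter_eq_nil_iff.mpr
    intro p hp
    have := (List.of_mem_zip hp).2
    simp only [List.any_eq_true, not_exists, not_and] at h
    simp [h _ this]
  simp [pvUnionSel, hfil]

-- one step of the prefix union, when both lists reach index i
theorem pvUnionSel_succ (xs : List (List String)) (sel : List Bool) (i : Nat)
    (hx : i < xs.length) (hs : i < sel.length) :
    pvUnionSel (xs.take (i+1)) (sel.take (i+1)) =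
      if sel[i] then PySem.Set.union (pvUnionSel (xs.take i) (sel.take i)) xs[i]
      else pvUnionSel (xs.take i) (sel.take i) := by
  have hxs : xs.take (i+1) = xs.take i ++ [xs[i]] := by
    rw [List.take_add_one, List.getElem?_eq_getElem hx]; rfl
  have hss : sel.take (i+1) = sel.take i ++ [sel[i]] := by
    rw [List.take_add_one, List.getElem?_eq_getElem hs]; rfl
  have hlen : (xs.take i).length = (sel.take i).length := by
    simp [Nat.le_of_lt hx, Nat.le_of_lt hs]
  rw [hxs, hss]
  unfold pvUnionSel
  rw [List.zip_append (by simpa using hlen), List.filter_append, List.map_append]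
  by_cases hb : sel[i] = true
  · simp [hb, List.foldl_append]
  · simp [hb]

-- the first-argument truncation is absorbed when that list is short
theorem pvUnionSel_take_left_stable (xs : List (List String)) (sel : List Bool) (i : Nat)
    (h : xs.length ≤ i) :
    pvUnionSel (xs.take (i+1)) (sel.take (i+1)) = pvUnionSel (xs.take i) (sel.take i) := by
  rw [List.take_of_length_le (Nat.le_succ_of_le h), List.take_of_length_le h]
  unfold pvUnionSel
  rw [pv_zip_take_right _ _ _ (Nat.le_succ_of_le h), pv_zip_take_right _ _ _ h]

-- B's guard-driven step equals the prefix-union step (adds side: i < adds.length)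
theorem pvStep_adds (adds : List (List String)) (sel : List Bool) (i : Nat)
    (hi : i < adds.length) :
    pvUnionSel (adds.take (i+1)) (sel.take (i+1)) =
      if (decide (i < sel.length) && sel.getD i false) then
        PySem.Set.union (pvUnionSel (adds.take i) (sel.take i)) (adds.getD i [])
      else pvUnionSel (adds.take i) (sel.take i) := by
  by_cases hs : i < sel.length
  · rw [pvUnionSel_succ adds sel i hi hs]
    simp [hs, List.getD_eq_getElem?_getD, List.getElem?_eq_getElem hi]
  · have hle : sel.length ≤ i := Nat.le_of_not_lt hs
    simp only [hs, decide_false, Bool.false_and, Bool.false_eq_true, if_false]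
    rw [List.take_of_length_le (Nat.le_succ_of_le hle), List.take_of_length_le hle]
    unfold pvUnionSel
    rw [pv_zip_take_left _ _ _ (Nat.le_succ_of_le hle), pv_zip_take_left _ _ _ hle]

-- B's guard-driven step equals the prefix-union step (costs side: i may exceed costs.length)
theorem pvStep_costs (costs : List (List String)) (sel : List Bool) (i : Nat) :
    pvUnionSel (costs.take (i+1)) (sel.take (i+1)) =
      if (decide (i < sel.length) && sel.getD i false) then
        (if i < costs.length then
          PySem.Set.union (pvUnionSel (costs.take i) (sel.take i)) (costs.getD i [])
         else pvUnionSel (costs.take i) (sel.take i))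
      else pvUnionSel (costs.take i) (sel.take i) := by
  by_cases hc : i < costs.length
  · rw [pvStep_adds costs sel i hc, if_pos hc]
  · rw [pvUnionSel_take_left_stable costs sel i (Nat.le_of_not_lt hc), if_neg hc, ite_self]

-- the loop invariant of B: after i steps the state holds all prefix unions up to i
theorem pvFoldB_inv (adds costs : List (List String)) (sel : List Bool) (i : Nat)
    (hi : i ≤ adds.length) :
    (List.range i).foldl (pvStepB adds costs sel)
        ([PySem.Set.empty], [PySem.Set.empty], [PySem.Set.empty],
         PySem.Set.empty, PySem.Set.empty) =
      ((List.range (i+1)).map (fun e => pvUnionSel (adds.take e) (sel.take e)),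
       (List.range (i+1)).map (fun e => pvUnionSel (costs.take e) (sel.take e)),
       PySem.Set.empty :: (List.range i).map (fun j =>
         PySem.Set.diff (pvUnionSel (costs.take (j+1)) (sel.take (j+1)))
                        (pvUnionSel (adds.take j) (sel.take j))),
       pvUnionSel (adds.take i) (sel.take i),
       pvUnionSel (costs.take i) (sel.take i)) := by
  induction i with
  | zero => simp [List.range_succ, pvUnionSel, PySem.Set.empty]
  | succ i ih =>
    have hi' : i ≤ adds.length := Nat.le_of_succ_le hi
    rw [List.range_succ, List.foldl_append, ih hi']
    have hA := pvStep_adds adds sel i (by omega)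
    have hC := pvStep_costs costs sel i
    simp only [List.foldl_cons, List.foldl_nil, pvStepB]
    by_cases hg : (decide (i < sel.length) && sel.getD i false) = true
    · simp only [hg, if_true] at hA hC ⊢
      by_cases hc : i < costs.length
      · simp only [hc, if_true] at hC
        simp [hA, hC, hc, List.range_succ (n := i+1), List.map_append]
      · simp only [hc, if_false] at hC ⊢
        simp [hA, hC, List.range_succ (n := i+1), List.map_append]
    · simp only [hg] at hA hC ⊢
      simp [hA, hC, List.range_succ (n := i+1), List.map_append]

-- the `if any(selected[:end])` guard in A is redundant: an all-false prefix unions to ∅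
theorem pvA_guard_collapse (xs : List (List String)) (sel : List Bool) (e : Nat) :
    (if (sel.take e).any (fun b => b) then pvUnionSel (xs.take e) (sel.take e)
     else PySem.Set.empty) = pvUnionSel (xs.take e) (sel.take e) := by
  by_cases h : (sel.take e).any (fun b => b) = true
  · simp [h]
  · simp [h, pvUnionSel_of_any_false _ _ h]

-- ===== VERDICT (by name: the statement is the Claim_ definition above) =====
theorem implied_previous_needs_spec : Claim_equal_implied_previous_needs := by
  intro adds costs sel _
  unfold Spec_implied_previous_needs implied_previous_needs implied_previous_needs_alt
  rw [pvFoldB_inv adds costs sel adds.length le_rfl]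
  simp only [pvA_guard_collapse, Prod.mk.injEq]
  refine ⟨trivial, trivial, ?_⟩
  have h0 : List.range (adds.length + 1) = 0 :: (List.range adds.length).map Nat.succ :=
    List.range_succ_eq_map
  have h1 : List.range (adds.length + 1) = List.range adds.length ++ [adds.length] :=
    List.range_succ
  congr 1
  · -- head: needs[0] = ∅
    rw [h0]; simp [pvUnionSel]
  · -- tail: zip of the shifted maps
    rw [show ((List.range (adds.length + 1)).map
          (fun e => pvUnionSel (costs.take e) (sel.take e))).drop 1 =
        (List.range adds.length).map
          (fun j => pvUnionSel (costs.take (j+1)) (sel.take (j+1))) by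
      rw [h0]; simp [Function.comp_def]]
    rw [show ((List.range (adds.length + 1)).map
          (fun e => pvUnionSel (adds.take e) (sel.take e))).dropLast =
        (List.range adds.length).map
          (fun j => pvUnionSel (adds.take j) (sel.take j)) by
      rw [h1]; simp]
    rw [List.zip_map']
    simp [Function.comp_def]
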